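-- pv_equiv track=rewrite | github.com/nishio/atcoder | libs/suffix_array.py | get_ls
-- ===== SOURCE A (Python) =====
-- SMALLER = 0
--
-- LARGER = 1
--
-- def get_ls(seq):
--     "smaller: 0, larger: 1"
--     N = len(seq)
--     ls = [SMALLER] * N
--     # sentinel is the smallest
--     # ls[-1] = SMALLER
--
--     for i in range(N - 2, -1, -1):
--         # s[i] < s[i+1] なら明らかに s[i..] < s[i+1..] => i は S 型
--         # s[i] > s[i+1] なら明らかに s[i..] > s[i+1..] => i は L 型
--         # s[i] == s[i+1] の場合、s[i..] <=> s[i+1..] の比較結果は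
--         # s[i+1..] <=> s[i+2..] に準ずる (つまり ls[i + 1] と同じ)
--         if seq[i] < seq[i + 1]:
--             ls[i] = SMALLER
--         elif seq[i] > seq[i + 1]:
--             ls[i] = LARGER
--         else:
--             ls[i] = ls[i + 1]
--     return ls
-- ===== SOURCE B (Python) =====
-- SMALLER = 0
--
-- LARGER = 1
--
-- def get_ls(seq):
--     "smaller: 0, larger: 1"
--     # run-based: split seq into maximal runs of equal values; each run's type
--     # is decided once by comparing its value with the next run's first value
--     # (the trailing run is SMALLER), then the whole run is filled with it.
--     N = len(seq)
--     ls = []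
--     i = 0
--     while i < N:
--         j = i + 1
--         while j < N and seq[j] == seq[i]:
--             j += 1
--         t = LARGER if j < N and seq[j] < seq[i] else SMALLER
--         ls.extend([t] * (j - i))
--         i = j
--     return ls
-- ===== Notes on version B (the rewrite author's own statement) =====
-- stated objective: alternative
-- what changed: Replaces the backward index loop that propagates each element's type from its right neighbour with a forward scan over maximal runs of equal values, deciding each run's type once against the next run's first value (trailing run SMALLER) and filling the whole run, building a fresh list.
import Mathlib
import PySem

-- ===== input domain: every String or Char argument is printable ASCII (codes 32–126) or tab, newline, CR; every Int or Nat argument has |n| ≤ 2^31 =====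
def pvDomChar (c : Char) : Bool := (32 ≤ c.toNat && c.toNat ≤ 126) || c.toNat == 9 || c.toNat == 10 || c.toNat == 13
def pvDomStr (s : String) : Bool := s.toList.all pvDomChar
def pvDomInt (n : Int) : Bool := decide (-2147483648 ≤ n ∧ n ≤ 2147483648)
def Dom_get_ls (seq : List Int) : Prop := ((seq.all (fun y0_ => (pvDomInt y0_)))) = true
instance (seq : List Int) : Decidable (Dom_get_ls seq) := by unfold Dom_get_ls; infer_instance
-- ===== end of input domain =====

-- B replaces A's backward right-neighbour propagation by a forward scan over maximal
-- runs of equal values (objective: alternative decomposition, same cost).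

-- ===== PORT A =====
def get_ls (seq : List Int) : List Int :=
  let N : Int := PySem.List.len seq
  let ls : List Int := List.replicate seq.length (0 : Int)  -- [SMALLER] * N
  (PySem.List.pyRange (N - 2) (-1) (-1)).foldl
    (fun ls i =>
      if PySem.List.pyGetD seq i 0 < PySem.List.pyGetD seq (i + 1) 0 then
        PySem.List.pySetD ls i 0
      else if PySem.List.pyGetD seq i 0 > PySem.List.pyGetD seq (i + 1) 0 then
        PySem.List.pySetD ls i 1
      else
        PySem.List.pySetD ls i (PySem.List.pyGetD ls (i + 1) 0)) ls

-- ===== PORT B =====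
-- inner while: advance j past the run of values equal to x
def pvRunEnd (seq : List Int) (x : Int) (j : Nat) : Nat :=
  if j < seq.length ∧ PySem.List.pyGetD seq (j : Int) 0 = x then pvRunEnd seq x (j + 1)
  else j
termination_by seq.length - j
decreasing_by omega

theorem pvRunEnd_ge (seq : List Int) (x : Int) (j : Nat) : j ≤ pvRunEnd seq x j := by
  unfold pvRunEnd
  split
  · exact le_trans (Nat.le_succ j) (pvRunEnd_ge seq x (j + 1))
  · exact le_refl j
termination_by seq.length - j
decreasing_by omega

-- outer while: one run at a time
def pvFill (seq : List Int) (ls : List Int) (i : Nat) : List Int :=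
  if h : i < seq.length then
    let j := pvRunEnd seq (PySem.List.pyGetD seq (i : Int) 0) (i + 1)
    let t : Int :=
      if j < seq.length ∧ PySem.List.pyGetD seq (j : Int) 0 < PySem.List.pyGetD seq (i : Int) 0
      then 1 else 0
    pvFill seq (ls ++ List.replicate (j - i) t) j
  else ls
termination_by seq.length - i
decreasing_by
  have := pvRunEnd_ge seq (PySem.List.pyGetD seq (i : Int) 0) (i + 1)
  omega

def get_ls_alt (seq : List Int) : List Int := pvFill seq [] 0

-- ===== PRECONDITION & SPEC =====
def Spec_get_ls (seq : List Int) (out : List Int) : Prop := out = get_ls_alt seq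
instance (seq : List Int) (out : List Int) : Decidable (Spec_get_ls seq out) := by unfold Spec_get_ls; infer_instance

-- ===== CLAIM (what is proved, stated in full; the proofs are below) =====
def Claim_equal_get_ls : Prop := ∀ (seq : List Int), Dom_get_ls seq → Spec_get_ls seq (get_ls seq)

-- ===== LEMMAS AND PROOFS =====

-- reference recursion: the element-wise S/L classification
def pvG : List Int → List Int
  | [] => []
  | [_] => [0]
  | x :: y :: t =>
      (if x < y then 0 else if y < x then 1 else (pvG (y :: t)).headD 0) :: pvG (y :: t)

theorem pvG_length : ∀ s : List Int, (pvG s).length = s.length := by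
  intro s
  match s with
  | [] => rfl
  | [_] => rfl
  | x :: y :: t => simp [pvG, pvG_length (y :: t)]

theorem pvG_last : ∀ s : List Int, s ≠ [] → (pvG s).getD (s.length - 1) 0 = 0 := by
  intro s hs
  match s with
  | [x] => rfl
  | x :: y :: t =>
      have h := pvG_last (y :: t) (by simp)
      simp only [pvG, List.length_cons] at *
      simpa using h

theorem pvG_step : ∀ (s : List Int) (k : Nat), k + 1 < s.length →
    (pvG s).getD k 0 =
      (if s.getD k 0 < s.getD (k + 1) 0 then 0
       else if s.getD (k + 1) 0 < s.getD k 0 then 1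
       else (pvG s).getD (k + 1) 0) := by
  intro s k hk
  match s, k with
  | x :: y :: t, 0 =>
      have hl : pvG (y :: t) ≠ [] := by
        have := pvG_length (y :: t); intro h; rw [h] at this; simp at this
      simp [pvG, List.getD, List.head?_eq_getElem?]
  | x :: y :: t, k + 1 =>
      have h := pvG_step (y :: t) k (by simpa using Nat.lt_of_succ_lt_succ hk)
      simpa [pvG, List.getD_cons_succ] using h

-- run split on lists: (length of leading run of x, remainder)
def pvRunSplit (x : Int) : List Int → Nat × List Int
  | [] => (0, [])
  | y :: t => if y = x then ((pvRunSplit x t).1 + 1, (pvRunSplit x t).2) else (0, y :: t)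

def pvT (x : Int) : List Int → Int
  | [] => 0
  | y :: _ => if y < x then 1 else 0

theorem pvG_run : ∀ (x : Int) (s : List Int),
    pvG (x :: s) = List.replicate ((pvRunSplit x s).1 + 1) (pvT x (pvRunSplit x s).2)
      ++ pvG (pvRunSplit x s).2 := by
  intro x s
  match s with
  | [] => simp [pvRunSplit, pvG, pvT]
  | y :: t =>
      by_cases hxy : y = x
      · subst hxy
        have ih := pvG_run y t
        have hl : pvG (y :: t) ≠ [] := by
          have := pvG_length (y :: t); intro h; rw [h] at this; simp at this
        simp only [pvRunSplit]
        rw [List.replicate_succ, List.cons_append]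
        rw [show pvG (y :: y :: t) =
          (if y < y then (0:Int) else if y < y then 1 else (pvG (y :: t)).headD 0) :: pvG (y :: t) from rfl]
        rw [ih]
        simp [List.replicate_succ]
      · simp only [pvRunSplit, if_neg hxy]
        rw [show pvG (x :: y :: t) =
          (if x < y then (0:Int) else if y < x then 1 else (pvG (y :: t)).headD 0) :: pvG (y :: t) from rfl]
        have hne : x ≠ y := fun h => hxy h.symm
        rcases lt_or_gt_of_ne hne with h | h
        · simp [pvT, h, not_lt_of_gt h, List.replicate_succ]
        · simp [pvT, h, not_lt_of_gt h, List.replicate_succ]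

-- B side ---------------------------------------------------------------

theorem pvRunEnd_eq (seq : List Int) (x : Int) : ∀ j : Nat,
    pvRunEnd seq x j = j + (pvRunSplit x (seq.drop j)).1 ∧
    seq.drop (pvRunEnd seq x j) = (pvRunSplit x (seq.drop j)).2 := by
  intro j
  by_cases hj : j < seq.length
  · have hdrop : seq.drop j = seq[j] :: seq.drop (j + 1) := List.drop_eq_getElem_cons hj
    have hget : PySem.List.pyGetD seq (j : Int) 0 = seq[j] := by
      simp [PySem.List.pyGetD_natCast, List.getD, List.getElem?_eq_getElem hj]
    by_cases hx : seq[j] = x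
    · have ih := pvRunEnd_eq seq x (j + 1)
      rw [show pvRunEnd seq x j = pvRunEnd seq x (j + 1) by
        rw [pvRunEnd]; rw [if_pos ⟨hj, by rw [hget]; exact hx⟩]]
      rw [hdrop]
      simp only [pvRunSplit, if_pos hx]
      refine ⟨?_, ih.2⟩
      rw [ih.1]; omega
    · rw [show pvRunEnd seq x j = j by
        rw [pvRunEnd]; rw [if_neg (by rw [hget]; tauto)]]
      rw [hdrop]
      simp only [pvRunSplit, if_neg hx]
      exact ⟨by omega, trivial⟩
  · have hd : seq.drop j = [] := List.drop_eq_nil_of_le (by omega)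
    rw [show pvRunEnd seq x j = j by
      rw [pvRunEnd]; rw [if_neg (by tauto)]]
    simp [hd, pvRunSplit]
termination_by j => seq.length - j
decreasing_by omega

theorem pvFill_eq (seq : List Int) : ∀ (i : Nat) (ls : List Int),
    pvFill seq ls i = ls ++ pvG (seq.drop i) := by
  intro i ls
  by_cases hi : i < seq.length
  · have hdrop : seq.drop i = seq[i] :: seq.drop (i + 1) := List.drop_eq_getElem_cons hi
    have hget : PySem.List.pyGetD seq (i : Int) 0 = seq[i] := by
      simp [PySem.List.pyGetD_natCast, List.getD, List.getElem?_eq_getElem hi]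
    obtain ⟨hj1, hj2⟩ := pvRunEnd_eq seq seq[i] (i + 1)
    have hjge : i + 1 ≤ pvRunEnd seq seq[i] (i + 1) := pvRunEnd_ge seq seq[i] (i + 1)
    have ih := pvFill_eq seq (pvRunEnd seq seq[i] (i + 1))
      (ls ++ List.replicate (pvRunEnd seq seq[i] (i + 1) - i)
        (if pvRunEnd seq seq[i] (i + 1) < seq.length ∧
            PySem.List.pyGetD seq ((pvRunEnd seq seq[i] (i + 1) : Nat) : Int) 0 < seq[i]
         then (1:Int) else 0))
    rw [pvFill, dif_pos hi]
    simp only [hget]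
    rw [ih, hj2, hdrop, pvG_run, List.append_assoc]
    have hlen : pvRunEnd seq seq[i] (i + 1) - i
        = (pvRunSplit seq[i] (seq.drop (i + 1))).1 + 1 := by omega
    have htt :
        (if pvRunEnd seq seq[i] (i + 1) < seq.length ∧
            PySem.List.pyGetD seq ((pvRunEnd seq seq[i] (i + 1) : Nat) : Int) 0 < seq[i]
         then (1:Int) else 0)
        = pvT seq[i] (pvRunSplit seq[i] (seq.drop (i + 1))).2 := by
      rcases hr : (pvRunSplit seq[i] (seq.drop (i + 1))).2 with _ | ⟨y, t⟩
      · have hle : seq.length ≤ pvRunEnd seq seq[i] (i + 1) :=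
          List.drop_eq_nil_iff.mp (hj2.trans hr)
        have hnl : ¬ pvRunEnd seq seq[i] (i + 1) < seq.length := by omega
        simp [pvT, hnl]
      · have hjl : pvRunEnd seq seq[i] (i + 1) < seq.length := by
          by_contra h
          have hnil : seq.drop (pvRunEnd seq seq[i] (i + 1)) = [] :=
            List.drop_eq_nil_of_le (by omega)
          rw [hj2, hr] at hnil
          exact absurd hnil (by simp)
        have hy : seq[pvRunEnd seq seq[i] (i + 1)] = y := by
          have hc : seq.drop (pvRunEnd seq seq[i] (i + 1))
              = seq[pvRunEnd seq seq[i] (i + 1)] :: seq.drop (pvRunEnd seq seq[i] (i + 1) + 1) :=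
            List.drop_eq_getElem_cons hjl
          rw [hj2, hr] at hc
          exact (List.cons_eq_cons.mp hc.symm).1
        have hgj : PySem.List.pyGetD seq ((pvRunEnd seq seq[i] (i + 1) : Nat) : Int) 0 = y := by
          simp [PySem.List.pyGetD_natCast, List.getD, List.getElem?_eq_getElem hjl, hy]
        simp [pvT, hgj, hjl]
    rw [hlen, htt]
  · have hd : seq.drop i = [] := List.drop_eq_nil_of_le (by omega)
    rw [pvFill, dif_neg hi, hd]
    simp [pvG]
termination_by i => seq.length - i
decreasing_by
  have := pvRunEnd_ge seq seq[i] (i + 1)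
  omega

theorem alt_eq_pvG (seq : List Int) : get_ls_alt seq = pvG seq := by
  unfold get_ls_alt
  simpa using pvFill_eq seq 0 []

-- A side ---------------------------------------------------------------

theorem pvSetRep : ∀ (k : Nat) (v : Int),
    (List.replicate (k + 1) (0 : Int)).set k v = List.replicate k 0 ++ [v] := by
  intro k
  induction k with
  | zero => intro v; rfl
  | succ k ih =>
      intro v
      rw [List.replicate_succ, List.set_cons_succ, ih, List.replicate_succ, List.cons_append]

theorem pvLoopA (seq : List Int) : ∀ k : Nat, k < seq.length →
    (PySem.List.pyRange ((k : Int) - 1) (-1) (-1)).foldl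
      (fun ls i =>
        if PySem.List.pyGetD seq i 0 < PySem.List.pyGetD seq (i + 1) 0 then
          PySem.List.pySetD ls i 0
        else if PySem.List.pyGetD seq i 0 > PySem.List.pyGetD seq (i + 1) 0 then
          PySem.List.pySetD ls i 1
        else
          PySem.List.pySetD ls i (PySem.List.pyGetD ls (i + 1) 0))
      (List.replicate k 0 ++ (pvG seq).drop k) = pvG seq := by
  intro k hk
  induction k with
  | zero =>
      rw [show ((0 : Nat) : Int) - 1 = -1 by norm_num,
        PySem.List.pyRange_neg_one_eq_nil (le_refl _)]
      simp
  | succ k ih =>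
      have hkl : k < seq.length := by omega
      have hRlen : (pvG seq).length = seq.length := pvG_length seq
      rw [show (((k + 1 : Nat)) : Int) - 1 = (k : Int) by push_cast; ring]
      rw [PySem.List.pyRange_neg_one_cons (by omega)]
      rw [List.foldl_cons]
      have e1 : PySem.List.pyGetD seq (k : Int) 0 = seq.getD k 0 := by
        simp [PySem.List.pyGetD_natCast]
      have ecast : (k : Int) + 1 = ((k + 1 : Nat) : Int) := by push_cast; ring
      have e2 : PySem.List.pyGetD seq ((k : Int) + 1) 0 = seq.getD (k + 1) 0 := by
        rw [ecast, PySem.List.pyGetD_natCast]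
      have e3 : PySem.List.pyGetD (List.replicate (k + 1) 0 ++ (pvG seq).drop (k + 1)) ((k : Int) + 1) 0
          = (pvG seq).getD (k + 1) 0 := by
        rw [ecast, PySem.List.pyGetD_natCast]
        rw [List.getD_append_right _ _ _ _ (by simp)]
        simp [List.getD, List.getElem?_drop]
      have e4 : ∀ v : Int,
          PySem.List.pySetD (List.replicate (k + 1) 0 ++ (pvG seq).drop (k + 1)) (k : Int) v
          = List.replicate k 0 ++ v :: (pvG seq).drop (k + 1) := by
        intro v
        rw [PySem.List.pySetD_natCast]
        rw [List.set_append_left _ _ (by simp)]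
        rw [pvSetRep]
        simp
      have hdropk : (pvG seq).drop k = (pvG seq).getD k 0 :: (pvG seq).drop (k + 1) := by
        rw [List.drop_eq_getElem_cons (by omega)]
        simp [List.getD, List.getElem?_eq_getElem (show k < (pvG seq).length by omega)]
      have hstep := pvG_step seq k hk
      have hbody :
          (if PySem.List.pyGetD seq (k : Int) 0 < PySem.List.pyGetD seq ((k : Int) + 1) 0 then
            PySem.List.pySetD (List.replicate (k + 1) 0 ++ (pvG seq).drop (k + 1)) (k : Int) 0
          else if PySem.List.pyGetD seq (k : Int) 0 > PySem.List.pyGetD seq ((k : Int) + 1) 0 then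
            PySem.List.pySetD (List.replicate (k + 1) 0 ++ (pvG seq).drop (k + 1)) (k : Int) 1
          else
            PySem.List.pySetD (List.replicate (k + 1) 0 ++ (pvG seq).drop (k + 1)) (k : Int)
              (PySem.List.pyGetD (List.replicate (k + 1) 0 ++ (pvG seq).drop (k + 1)) ((k : Int) + 1) 0))
          = List.replicate k 0 ++ (pvG seq).drop k := by
        rw [e1, e2, e3, e4, e4, e4, hdropk, hstep]
        split_ifs <;> rfl
      rw [hbody]
      exact ih hkl

theorem get_ls_eq_pvG (seq : List Int) : get_ls seq = pvG seq := by
  match seq with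
  | [] =>
      unfold get_ls
      simp only [PySem.List.len_eq, List.length_nil]
      rw [show ((0 : Nat) : Int) - 2 = (-2 : Int) by norm_num]
      rw [PySem.List.pyRange_neg_one_eq_nil (by norm_num)]
      rfl
  | a :: s =>
      have hlen : (a :: s).length = s.length + 1 := by simp
      have hRlen : (pvG (a :: s)).length = s.length + 1 := by rw [pvG_length, hlen]
      have hlast : (pvG (a :: s)).getD s.length 0 = 0 := by
        have := pvG_last (a :: s) (by simp)
        simpa [hlen] using this
      have hinit : List.replicate (s.length + 1) (0 : Int)
          = List.replicate s.length 0 ++ (pvG (a :: s)).drop s.length := by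
        have hdp : (pvG (a :: s)).drop s.length
            = [(pvG (a :: s)).getD s.length 0] := by
          rw [List.drop_eq_getElem_cons (by omega)]
          rw [List.drop_eq_nil_of_le (by omega)]
          simp [List.getD, List.getElem?_eq_getElem (show s.length < (pvG (a :: s)).length by omega)]
        rw [hdp, hlast, List.replicate_succ']
      have hmain := pvLoopA (a :: s) s.length (by omega)
      unfold get_ls
      simp only [PySem.List.len_eq, hlen]
      rw [show ((s.length + 1 : Nat) : Int) - 2 = (s.length : Int) - 1 by push_cast; ring]
      rw [hinit]
      exact hmain

-- ===== VERDICT (by name: the statement is the Claim_ definition above) =====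
theorem get_ls_spec : Claim_equal_get_ls := by
  intro seq _
  unfold Spec_get_ls
  rw [get_ls_eq_pvG, alt_eq_pvG]
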